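-- pv_equiv track=rewrite | github.com/dock108dev/sda | api/app/services/pipeline/stages/select_key_plays.py | _detect_run_ending_plays
-- ===== SOURCE A (Python) =====
-- from typing import Any
--
-- def _detect_run_ending_plays(
--     pbp_events: list[dict[str, Any]],
--     scoring_run_min: int,
-- ) -> set[int]:
--     """Mark plays that ended a sustained scoring run by the same team.
--
--     Approximates point-value with the score delta — works for all four sports
--     because we only care about which team scored, not how many points.
--     """
--     run_enders: set[int] = set()
--     consecutive_scorer: int | None = None
--     run_total = 0
--     last_run_play: int | None = None
--     prev_h = 0
--     prev_a = 0
--     for ev in pbp_events: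
--         h = ev.get("home_score") or 0
--         a = ev.get("away_score") or 0
--         h_delta = h - prev_h
--         a_delta = a - prev_a
--         if h_delta > 0 and a_delta == 0:
--             scorer = 1
--             points = h_delta
--         elif a_delta > 0 and h_delta == 0:
--             scorer = -1
--             points = a_delta
--         else:
--             prev_h, prev_a = h, a
--             continue
--         play_id = ev.get("play_index")
--         if scorer == consecutive_scorer:
--             run_total += points
--             last_run_play = play_id
--         else:
--             if run_total >= scoring_run_min and last_run_play is not None:
--                 run_enders.add(last_run_play)
--             consecutive_scorer = scorer
--             run_total = points
--             last_run_play = play_id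
--         prev_h, prev_a = h, a
--     if run_total >= scoring_run_min and last_run_play is not None:
--         run_enders.add(last_run_play)
--     return run_enders
-- ===== SOURCE B (Python) =====
-- from itertools import groupby
--
--
-- def _detect_run_ending_plays(pbp_events, scoring_run_min):
--     # Phase 1: extract scoring events as (scorer, points, play_index) triples.
--     scoring = []
--     prev_h = 0
--     prev_a = 0
--     for ev in pbp_events:
--         h = ev.get("home_score") or 0
--         a = ev.get("away_score") or 0
--         h_delta = h - prev_h
--         a_delta = a - prev_a
--         prev_h, prev_a = h, a
--         if h_delta > 0 and a_delta == 0: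
--             scoring.append((1, h_delta, ev.get("play_index")))
--         elif a_delta > 0 and h_delta == 0:
--             scoring.append((-1, a_delta, ev.get("play_index")))
--     # Phase 2: group consecutive same-scorer triples into runs; a run whose
--     # points sum reaches the threshold marks its last play as a run ender.
--     run_enders = set()
--     for _, grp in groupby(scoring, key=lambda t: t[0]):
--         run = list(grp)
--         total = sum(p for _, p, _ in run)
--         last_play = run[-1][2]
--         if total >= scoring_run_min and last_play is not None:
--             run_enders.add(last_play)
--     return run_enders
-- ===== Notes on version B (the rewrite author's own statement) =====
-- stated objective: alternative
-- what changed: Replaces A's single loop with interleaved run-tracking state (consecutive_scorer/run_total/last_run_play mutated mid-iteration) by a two-phase pipeline: first extract scoring events as (scorer, points, play_index) triples, then itertools.groupby consecutive same-scorer triples into runs and mark each qualifying run's last play.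
import Mathlib
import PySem

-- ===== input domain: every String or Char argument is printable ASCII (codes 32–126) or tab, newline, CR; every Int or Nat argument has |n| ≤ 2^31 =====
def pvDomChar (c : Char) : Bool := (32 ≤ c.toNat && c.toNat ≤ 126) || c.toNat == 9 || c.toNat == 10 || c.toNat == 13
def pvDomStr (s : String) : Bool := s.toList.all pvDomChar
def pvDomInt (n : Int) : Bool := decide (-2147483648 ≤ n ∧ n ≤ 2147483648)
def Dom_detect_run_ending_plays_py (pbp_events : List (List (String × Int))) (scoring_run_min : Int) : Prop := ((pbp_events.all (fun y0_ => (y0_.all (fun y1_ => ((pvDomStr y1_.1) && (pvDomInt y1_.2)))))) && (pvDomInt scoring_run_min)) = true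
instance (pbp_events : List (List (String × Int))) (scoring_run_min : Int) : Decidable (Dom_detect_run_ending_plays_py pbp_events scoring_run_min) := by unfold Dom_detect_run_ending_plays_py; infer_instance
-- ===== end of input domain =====

-- B replaces A's interleaved run-tracking accumulator by a two-phase build-then-group
-- decomposition (extract scoring triples, then itertools.groupby into runs); alternative
-- decomposition, same cost, same return value.

-- ===== PORT A =====
-- `if run_total >= scoring_run_min and last_run_play is not None: run_enders.add(last_run_play)`
def pvEmit (m : Int) (re : List Int) (tot : Int) (lp : Option Int) : List Int :=
  if tot ≥ m then
    match lp with
    | some p => PySem.Set.add re p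
    | none => re
  else re

-- the body of the two scoring branches (scorer/points already chosen)
def pvScoreA (m : Int) (s : List Int × Option Int × Int × Option Int × Int × Int)
    (scorer points : Int) (pid : Option Int) (h a : Int) :
    List Int × Option Int × Int × Option Int × Int × Int :=
  if some scorer = s.2.1 then (s.1, s.2.1, s.2.2.1 + points, pid, h, a)
  else (pvEmit m s.1 s.2.2.1 s.2.2.2.1, some scorer, points, pid, h, a)

-- one iteration of A's loop; state = (run_enders, consecutive_scorer, run_total, last_run_play, prev_h, prev_a)
def pvStepA (m : Int) (s : List Int × Option Int × Int × Option Int × Int × Int)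
    (ev : List (String × Int)) : List Int × Option Int × Int × Option Int × Int × Int :=
  let h := ((PySem.Dict.mk ev).get? "home_score").getD 0
  let a := ((PySem.Dict.mk ev).get? "away_score").getD 0
  let hd := h - s.2.2.2.2.1
  let ad := a - s.2.2.2.2.2
  if hd > 0 ∧ ad = 0 then pvScoreA m s 1 hd ((PySem.Dict.mk ev).get? "play_index") h a
  else if ad > 0 ∧ hd = 0 then pvScoreA m s (-1) ad ((PySem.Dict.mk ev).get? "play_index") h a
  else (s.1, s.2.1, s.2.2.1, s.2.2.2.1, h, a)

def detect_run_ending_plays_py (pbp_events : List (List (String × Int))) (scoring_run_min : Int) : List Int :=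
  let st := pbp_events.foldl (pvStepA scoring_run_min) ([], none, 0, none, 0, 0)
  pvEmit scoring_run_min st.1 st.2.2.1 st.2.2.2.1

-- ===== PORT B =====
-- phase 1 loop body: state = (prev_h, prev_a, scoring)
def pvStepExtract (s : Int × Int × List (Int × Int × Option Int)) (ev : List (String × Int)) :
    Int × Int × List (Int × Int × Option Int) :=
  let h := ((PySem.Dict.mk ev).get? "home_score").getD 0
  let a := ((PySem.Dict.mk ev).get? "away_score").getD 0
  let hd := h - s.1
  let ad := a - s.2.1
  if hd > 0 ∧ ad = 0 then (h, a, s.2.2 ++ [(1, hd, (PySem.Dict.mk ev).get? "play_index")])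
  else if ad > 0 ∧ hd = 0 then (h, a, s.2.2 ++ [(-1, ad, (PySem.Dict.mk ev).get? "play_index")])
  else (h, a, s.2.2)

-- itertools.groupby on the first component (consecutive runs, in order)
def pvGroupRunsAux (k : Int) (cur : List (Int × Int × Option Int)) :
    List (Int × Int × Option Int) → List (List (Int × Int × Option Int))
  | [] => [cur]
  | t :: rest => if t.1 = k then pvGroupRunsAux k (cur ++ [t]) rest
                 else cur :: pvGroupRunsAux t.1 [t] rest

def pvGroupRuns : List (Int × Int × Option Int) → List (List (Int × Int × Option Int))
  | [] => []
  | t :: rest => pvGroupRunsAux t.1 [t] rest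

-- phase 2 loop body: sum the run's points, take its last play_index, add if qualifying
def pvFinishRun (m : Int) (re : List Int) (run : List (Int × Int × Option Int)) : List Int :=
  let total := (run.map (fun t => t.2.1)).sum
  let lastPlay := (run.getLastD (0, 0, none)).2.2
  pvEmit m re total lastPlay

def detect_run_ending_plays_py_alt (pbp_events : List (List (String × Int))) (scoring_run_min : Int) : List Int :=
  let scoring := (pbp_events.foldl pvStepExtract (0, 0, [])).2.2
  (pvGroupRuns scoring).foldl (pvFinishRun scoring_run_min) []

-- ===== PRECONDITION & SPEC =====
def Spec_detect_run_ending_plays_py (pbp_events : List (List (String × Int))) (scoring_run_min : Int) (out : List Int) : Prop := out = detect_run_ending_plays_py_alt pbp_events scoring_run_min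
instance (pbp_events : List (List (String × Int))) (scoring_run_min : Int) (out : List Int) : Decidable (Spec_detect_run_ending_plays_py pbp_events scoring_run_min out) := by unfold Spec_detect_run_ending_plays_py; infer_instance

-- ===== CLAIM (what is proved, stated in full; the proofs are below) =====
def Claim_equal_detect_run_ending_plays_py : Prop := ∀ (pbp_events : List (List (String × Int))) (scoring_run_min : Int), Dom_detect_run_ending_plays_py pbp_events scoring_run_min → Spec_detect_run_ending_plays_py pbp_events scoring_run_min (detect_run_ending_plays_py pbp_events scoring_run_min)

-- ===== LEMMAS AND PROOFS =====

-- the scoring triples produced by phase 1, as a structural recursion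
def pvExtractRec : List (List (String × Int)) → Int → Int → List (Int × Int × Option Int)
  | [], _, _ => []
  | ev :: rest, ph, pa =>
    let h := ((PySem.Dict.mk ev).get? "home_score").getD 0
    let a := ((PySem.Dict.mk ev).get? "away_score").getD 0
    if h - ph > 0 ∧ a - pa = 0 then (1, h - ph, (PySem.Dict.mk ev).get? "play_index") :: pvExtractRec rest h a
    else if a - pa > 0 ∧ h - ph = 0 then (-1, a - pa, (PySem.Dict.mk ev).get? "play_index") :: pvExtractRec rest h a
    else pvExtractRec rest h a

-- A's loop restricted to the scoring triples (prev_h/prev_a fused away), final emit included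
def pvMachineA (m : Int) : List (Int × Int × Option Int) → List Int × Option Int × Int × Option Int → List Int
  | [], s => pvEmit m s.1 s.2.2.1 s.2.2.2
  | t :: rest, s =>
    if some t.1 = s.2.1 then pvMachineA m rest (s.1, s.2.1, s.2.2.1 + t.2.1, t.2.2)
    else pvMachineA m rest (pvEmit m s.1 s.2.2.1 s.2.2.2, some t.1, t.2.1, t.2.2)

lemma extract_foldl (pbp : List (List (String × Int))) :
    ∀ ph pa acc, (pbp.foldl pvStepExtract (ph, pa, acc)).2.2 = acc ++ pvExtractRec pbp ph pa := by
  induction pbp with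
  | nil => intro ph pa acc; simp [pvExtractRec]
  | cons ev rest ih =>
    intro ph pa acc
    simp only [List.foldl_cons, pvStepExtract, pvExtractRec]
    split_ifs <;> simp [ih]

lemma runA_machine (m : Int) (pbp : List (List (String × Int))) :
    ∀ re cs tot lp ph pa,
      pvEmit m ((pbp.foldl (pvStepA m) (re, cs, tot, lp, ph, pa)).1)
        ((pbp.foldl (pvStepA m) (re, cs, tot, lp, ph, pa)).2.2.1)
        ((pbp.foldl (pvStepA m) (re, cs, tot, lp, ph, pa)).2.2.2.1)
      = pvMachineA m (pvExtractRec pbp ph pa) (re, cs, tot, lp) := by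
  induction pbp with
  | nil => intro re cs tot lp ph pa; simp [pvMachineA, pvExtractRec]
  | cons ev rest ih =>
    intro re cs tot lp ph pa
    simp only [List.foldl_cons, pvStepA, pvExtractRec]
    split_ifs with h1 h2
    · simp only [pvScoreA, pvMachineA]
      split_ifs with hsc <;> simp [ih]
    · simp only [pvScoreA, pvMachineA]
      split_ifs with hsc <;> simp [ih]
    · exact ih re cs tot lp _ _

lemma machine_groupAux (m : Int) (ts : List (Int × Int × Option Int)) :
    ∀ (cur : List (Int × Int × Option Int)) re s,
      cur ≠ [] →
      pvMachineA m ts (re, some s, (cur.map (fun t => t.2.1)).sum, (cur.getLastD (0, 0, none)).2.2)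
      = (pvGroupRunsAux s cur ts).foldl (pvFinishRun m) re := by
  induction ts with
  | nil =>
    intro cur re s hcur
    simp [pvMachineA, pvGroupRunsAux, pvFinishRun]
  | cons t rest ih =>
    intro cur re s hcur
    simp only [pvMachineA, pvGroupRunsAux]
    split_ifs with h1 h2 h2
    · -- some t.1 = some s and t.1 = s
      have := ih (cur ++ [t]) re s (by simp)
      simpa [List.getLastD_concat] using this
    · exact absurd (by simpa using h1) h2
    · exact absurd (by simpa using h2) h1
    · -- new run
      have := ih [t] (pvFinishRun m re cur) t.1 (by simp)
      simp only [List.foldl_cons]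
      rw [← this]
      simp [pvFinishRun]

lemma machine_group (m : Int) (ts : List (Int × Int × Option Int)) (re : List Int) :
    pvMachineA m ts (re, none, 0, none) = (pvGroupRuns ts).foldl (pvFinishRun m) re := by
  cases ts with
  | nil => simp [pvMachineA, pvGroupRuns, pvEmit]
  | cons t rest =>
    simp only [pvMachineA, pvGroupRuns]
    have hne : ¬ (some t.1 = (none : Option Int)) := by simp
    rw [if_neg hne]
    have h0 : pvEmit m re 0 none = re := by simp [pvEmit]
    rw [h0]
    simpa using machine_groupAux m rest [t] re t.1 (by simp)

-- ===== VERDICT (by name: the statement is the Claim_ definition above) =====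
theorem detect_run_ending_plays_py_spec : Claim_equal_detect_run_ending_plays_py := by
  intro pbp m _
  unfold Spec_detect_run_ending_plays_py detect_run_ending_plays_py detect_run_ending_plays_py_alt
  rw [extract_foldl, runA_machine, machine_group]
  simp
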